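-- pv_equiv track=rewrite | github.com/jakobvalic/RAC-1 | 11-problem-nahrbtnika/01_nahrbtnik.py | mnoziceS
-- ===== SOURCE A (Python) =====
-- def sestaviZ(s, predmet):
--     '''Za neko množico s in predmet sestavi in vrne naslednjo množico z.'''
--     z = []
--     for par in s:
--         z.append((par[0] + predmet[0], par[1] + predmet[1]))
--     return z
--
-- def sestaviS(s, z):
--     '''Iz množic s_i in z_(i+1) sestavi s_(i+1).'''
--     nov_z = []
--     najVrednost = -1
--     i = 0 # Indeks v seznamu s
--     j = 0 # Indeks v seznamu z
--     while i < len(s) and j < len(z):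
--         volumenS = s[i][0]
--         vrednostS = s[i][1]
--         volumenZ = z[j][0]
--         vrednostZ = z[j][1]
--         if volumenS < volumenZ: # Ga dodamo, če dobimo večjo vrednost
--             if vrednostS > najVrednost:
--                 nov_z.append((volumenS, vrednostS))
--                 najVrednost = vrednostS
--             i += 1
--         elif volumenZ < volumenS:
--             if vrednostZ > najVrednost:
--                 nov_z.append((volumenZ, vrednostZ))
--                 najVrednost = vrednostZ
--             j += 1
--         else: # Volumna sta enaka
--             if vrednostS > vrednostZ:
--                 nov_z.append((volumenS, vrednostS))
--                 najVrednost = vrednostS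
--             else:
--                 nov_z.append((volumenZ, vrednostZ))
--                 najVrednost = vrednostZ
--             i += 1
--             j += 1
--     for par in z[j:]: # Preostanek je vedno v z
--         volumen = par[0]
--         vrednost = par[1]
--         if vrednost > najVrednost:
--             nov_z.append((volumen, vrednost))
--     return nov_z
--
-- def mnoziceS(predmeti):
--     '''Vrne množico predmetov S.'''
--     S = [(0, 0)]
--     mnozicaS = [S]
--     for predmet in predmeti:
--         Z = sestaviZ(S, predmet)
--         S = sestaviS(S, Z)
--         mnozicaS.append(S)
--     return mnozicaS
-- ===== SOURCE B (Python) =====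
-- def mnoziceS(predmeti):
--     '''Vrne množico predmetov S.'''
--     S = [(0, 0)]
--     rezultat = [S]
--     for w, v in predmeti:
--         kandidati = S + [(a + w, b + v) for a, b in S]
--         kandidati.sort(key=lambda p: p[0])
--         nov = []
--         najv = -1
--         i = 0
--         while i < len(kandidati):
--             vol, val = kandidati[i]
--             i += 1
--             while i < len(kandidati) and kandidati[i][0] == vol:
--                 if kandidati[i][1] > val:
--                     val = kandidati[i][1]
--                 i += 1
--             if val > najv:
--                 nov.append((vol, val))
--                 najv = val
--         S = nov
--         rezultat.append(S)
--     return rezultat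
-- ===== Notes on version B (the rewrite author's own statement) =====
-- stated objective: alternative
-- what changed: Replaces the hand-written two-pointer merge of the old frontier with its shifted copy (in-merge dominance checks plus a separate tail loop) by building the full candidate list, stable-sorting it by volume, and doing one grouped sweep that keeps the maximum value per volume and emits it only when it beats the running best; Pre_ restricts to the knapsack's natural domain of nonnegative item volumes, outside which A's tail loop (which assumes the remainder is always in the shifted copy) silently drops achievable frontier points.
-- outside the precondition, e.g. on mnoziceS([(-1, -1)]): A returns [[(0, 0)], []], B returns [[(0, 0)], [(0, 0)]]; on mnoziceS([(-1, 10)]): A returns [[(0, 0)], [(-1, 10)]], B returns [[(0, 0)], [(-1, 10)]]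
import Mathlib
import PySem

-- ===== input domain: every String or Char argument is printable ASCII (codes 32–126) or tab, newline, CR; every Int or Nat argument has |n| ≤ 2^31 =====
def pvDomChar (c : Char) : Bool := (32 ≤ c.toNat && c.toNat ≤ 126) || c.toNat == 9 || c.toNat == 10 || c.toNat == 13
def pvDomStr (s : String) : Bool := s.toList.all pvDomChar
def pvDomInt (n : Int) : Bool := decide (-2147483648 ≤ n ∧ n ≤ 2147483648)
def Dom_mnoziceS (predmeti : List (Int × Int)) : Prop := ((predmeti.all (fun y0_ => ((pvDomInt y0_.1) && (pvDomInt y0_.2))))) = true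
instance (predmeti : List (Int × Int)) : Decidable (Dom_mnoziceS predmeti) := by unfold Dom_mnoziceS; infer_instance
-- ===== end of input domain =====

-- B replaces A's two-pointer merge of the frontier with its shifted copy by a
-- stable sort of all candidate points by volume followed by one grouped sweep
-- (max value per volume, emitted only above the running best): an alternative
-- algorithm of similar cost on the knapsack's natural domain (see Pre_mnoziceS).

-- ===== PORT A =====
def sestaviZ (s : List (Int × Int)) (predmet : Int × Int) : List (Int × Int) :=
  s.map (fun par => (par.1 + predmet.1, par.2 + predmet.2))

-- the while-loop of sestaviS over indices i, j, transcribed as recursion on the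
-- two list suffixes with accumulator najVrednost; the trailing for-loop over
-- z[j:] is the filter in the first branch (najVrednost is not updated there)
def sestaviSLoop : List (Int × Int) → List (Int × Int) → Int → List (Int × Int)
  | [], z, najv => z.filter (fun par => decide (najv < par.2))
  | _ :: _, [], _ => []
  | (vs, cs) :: s, (vz, cz) :: z, najv =>
    if vs < vz then
      (if najv < cs then (vs, cs) :: sestaviSLoop s ((vz, cz) :: z) cs
       else sestaviSLoop s ((vz, cz) :: z) najv)
    else if vz < vs then
      (if najv < cz then (vz, cz) :: sestaviSLoop ((vs, cs) :: s) z cz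
       else sestaviSLoop ((vs, cs) :: s) z najv)
    else
      (if cz < cs then (vs, cs) :: sestaviSLoop s z cs
       else (vz, cz) :: sestaviSLoop s z cz)
termination_by s z _ => s.length + z.length

def sestaviS (s z : List (Int × Int)) : List (Int × Int) := sestaviSLoop s z (-1)

def mnoziceS (predmeti : List (Int × Int)) : List (List (Int × Int)) :=
  (predmeti.foldl (fun st predmet =>
      let Z := sestaviZ st.1 predmet
      let S := sestaviS st.1 Z
      (S, st.2 ++ [S]))
    ([(0, 0)], [[(0, 0)]])).2

-- ===== PORT B =====
-- Source B's grouped sweep: (vol, val) is the group being accumulated, najv the best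
def pometi : Int × Int → List (Int × Int) → Int → List (Int × Int)
  | (vol, val), (v2, c2) :: rest, najv =>
    if v2 = vol then pometi (vol, if val < c2 then c2 else val) rest najv
    else if najv < val then (vol, val) :: pometi (v2, c2) rest val
    else pometi (v2, c2) rest najv
  | (vol, val), [], najv => if najv < val then [(vol, val)] else []

-- one iteration of Source B's outer loop: candidates, stable sort by volume, sweep
def korak (s : List (Int × Int)) (predmet : Int × Int) : List (Int × Int) :=
  let kandidati := PySem.List.sorted
    (s ++ s.map (fun p => (p.1 + predmet.1, p.2 + predmet.2)))
    (fun p => p.1) false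
  match kandidati with
  | [] => []
  | c :: rest => pometi c rest (-1)

def mnoziceS_alt (predmeti : List (Int × Int)) : List (List (Int × Int)) :=
  (predmeti.foldl (fun st predmet =>
      let S := korak st.1 predmet
      (S, st.2 ++ [S]))
    ([(0, 0)], [[(0, 0)]])).2

-- ===== PRECONDITION & SPEC =====
-- Pre_ restricts to the knapsack's natural domain: every item has nonnegative
-- volume. On items with negative volume A's merge silently drops old frontier
-- points beyond the largest shifted volume (its tail loop assumes the remainder
-- is always in the shifted copy), an artefact outside the problem's domain,
-- while B keeps all candidates.
def Pre_mnoziceS (predmeti : List (Int × Int)) : Prop := ∀ p ∈ predmeti, 0 ≤ p.1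
instance (predmeti : List (Int × Int)) : Decidable (Pre_mnoziceS predmeti) := by unfold Pre_mnoziceS; infer_instance

def pvWitness_mnoziceS : (List (Int × Int)) := [(1, 2), (3, 4), (2, 2)]

def Spec_mnoziceS (predmeti : List (Int × Int)) (out : List (List (Int × Int))) : Prop := out = mnoziceS_alt predmeti
instance (predmeti : List (Int × Int)) (out : List (List (Int × Int))) : Decidable (Spec_mnoziceS predmeti out) := by unfold Spec_mnoziceS; infer_instance

-- ===== CLAIM (what is proved, stated in full; the proofs are below) =====
def Claim_equal_mnoziceS : Prop := ∀ (predmeti : List (Int × Int)), Dom_mnoziceS predmeti → Pre_mnoziceS predmeti → Spec_mnoziceS predmeti (mnoziceS predmeti)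

-- ===== LEMMAS AND PROOFS =====

-- the common abstraction both step functions reduce to: a sweep keeping points
-- whose value beats the running best
def sweepB : List (Int × Int) → Int → List (Int × Int)
  | [], _ => []
  | (vol, val) :: rest, najv =>
    if najv < val then (vol, val) :: sweepB rest val else sweepB rest najv

-- merge by volume collapsing equal volumes to the max value, discarding the
-- first list's tail once the second is exhausted (A's merge shape)
def mergeMax : List (Int × Int) → List (Int × Int) → List (Int × Int)
  | [], z => z
  | _ :: _, [] => []
  | (vs, cs) :: s, (vz, cz) :: z =>
    if vs < vz then (vs, cs) :: mergeMax s ((vz, cz) :: z)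
    else if vz < vs then (vz, cz) :: mergeMax ((vs, cs) :: s) z
    else (vs, if cs < cz then cz else cs) :: mergeMax s z
termination_by s z => s.length + z.length

-- the total variant keeping both tails (B's shape)
def mergeMaxT : List (Int × Int) → List (Int × Int) → List (Int × Int)
  | [], z => z
  | s, [] => s
  | (vs, cs) :: s, (vz, cz) :: z =>
    if vs < vz then (vs, cs) :: mergeMaxT s ((vz, cz) :: z)
    else if vz < vs then (vz, cz) :: mergeMaxT ((vs, cs) :: s) z
    else (vs, if cs < cz then cz else cs) :: mergeMaxT s z
termination_by s z => s.length + z.length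

-- stable merge keeping duplicates, first list first on equal volumes
def mergeKeep : List (Int × Int) → List (Int × Int) → List (Int × Int)
  | [], z => z
  | s, [] => s
  | a :: s, b :: z =>
    if a.1 ≤ b.1 then a :: mergeKeep s (b :: z) else b :: mergeKeep (a :: s) z
termination_by s z => s.length + z.length

def pometiTop (l : List (Int × Int)) (najv : Int) : List (Int × Int) :=
  match l with
  | [] => []
  | c :: rest => pometi c rest najv

def IncV (l : List (Int × Int)) : Prop := l.Pairwise (fun a b => a.1 < b.1)
def Inc2 (l : List (Int × Int)) : Prop := l.Pairwise (fun a b => a.1 < b.1 ∧ a.2 < b.2)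
def InvS (l : List (Int × Int)) : Prop := Inc2 l ∧ ∀ q ∈ l, 0 ≤ q.2

theorem sweepB_cons (c : Int × Int) (rest : List (Int × Int)) (b : Int) :
    sweepB (c :: rest) b = if b < c.2 then c :: sweepB rest c.2 else sweepB rest b := by
  obtain ⟨vol, val⟩ := c; rfl

theorem sweepB_mem_val : ∀ (l : List (Int × Int)) (b : Int),
    (∀ q ∈ sweepB l b, b < q.2) ∧ (sweepB l b).Pairwise (fun a c => a.2 < c.2) := by
  intro l
  induction l with
  | nil => intro b; simp [sweepB]
  | cons c rest ih =>
    intro b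
    rw [sweepB_cons]
    split_ifs with h
    · refine ⟨?_, ?_⟩
      · intro q hq
        rcases List.mem_cons.1 hq with rfl | hq
        · exact h
        · exact lt_trans h ((ih c.2).1 q hq)
      · exact List.pairwise_cons.2 ⟨fun q hq => (ih c.2).1 q hq, (ih c.2).2⟩
    · exact ih b

theorem sweepB_sublist : ∀ (l : List (Int × Int)) (b : Int), (sweepB l b).Sublist l := by
  intro l
  induction l with
  | nil => intro b; simp [sweepB]
  | cons c rest ih =>
    intro b
    rw [sweepB_cons]
    split_ifs with h
    · exact (ih c.2).cons₂ c
    · exact (ih b).cons c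

theorem sweep_all : ∀ (z : List (Int × Int)) (b : Int),
    z.Pairwise (fun a c => a.2 < c.2) → (∀ q ∈ z, b < q.2) → sweepB z b = z := by
  intro z
  induction z with
  | nil => intro b _ _; rfl
  | cons c rest ih =>
    intro b hp hall
    obtain ⟨hhd, htl⟩ := List.pairwise_cons.1 hp
    rw [sweepB_cons, if_pos (hall c List.mem_cons_self), ih c.2 htl hhd]

theorem filter_eq_sweepB : ∀ (z : List (Int × Int)) (b : Int),
    z.Pairwise (fun a c => a.2 < c.2) →
    z.filter (fun par => decide (b < par.2)) = sweepB z b := by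
  intro z
  induction z with
  | nil => intro b _; rfl
  | cons c rest ih =>
    intro b hp
    obtain ⟨hhd, htl⟩ := List.pairwise_cons.1 hp
    rw [sweepB_cons, List.filter_cons]
    by_cases h : b < c.2
    · rw [if_pos (by simpa using h), if_pos h]
      rw [List.filter_eq_self.2 (fun q hq => by simpa using lt_trans h (hhd q hq)),
        sweep_all rest c.2 htl hhd]
    · rw [if_neg (by simpa using h), if_neg h, ih b htl]

theorem loop_eq_sweep : ∀ (n : ℕ) (s z : List (Int × Int)) (b : Int),
    s.length + z.length ≤ n → Inc2 s → Inc2 z →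
    (∀ q ∈ s, ∀ r ∈ z, q.1 = r.1 → b < max q.2 r.2) →
    sestaviSLoop s z b = sweepB (mergeMax s z) b := by
  intro n
  induction n with
  | zero =>
    intro s z b hlen _ _ _
    match s, z with
    | [], [] => rw [sestaviSLoop, mergeMax]; rfl
    | a :: s, z => simp at hlen
    | [], a :: z => simp at hlen
  | succ n ih =>
    intro s z b hlen hs hz hb
    match s, z with
    | [], z =>
      rw [sestaviSLoop, mergeMax]
      exact filter_eq_sweepB z b (hz.imp (fun h => h.2))
    | a :: s, [] =>
      rw [sestaviSLoop, mergeMax]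
      rfl
    | (vs, cs) :: s, (vz, cz) :: z =>
      obtain ⟨hshd, hstl⟩ := List.pairwise_cons.1 hs
      obtain ⟨hzhd, hztl⟩ := List.pairwise_cons.1 hz
      simp only [List.length_cons] at hlen
      rw [sestaviSLoop, mergeMax]
      rcases lt_trichotomy vs vz with hv | hv | hv
      · rw [if_pos hv, if_pos hv, sweepB_cons]
        split_ifs with hc
        · congr 1
          apply ih _ _ _ (by simp; omega) hstl hz
          intro q hq r hr _
          exact lt_of_lt_of_le (hshd q hq).2 (le_max_left _ _)
        · apply ih _ _ _ (by simp; omega) hstl hz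
          intro q hq r hr he
          exact hb q (List.mem_cons_of_mem _ hq) r hr he
      · -- equal volumes: A appends the larger value; it always beats the best
        have hnn1 : ¬ vs < vz := by omega
        have hnn2 : ¬ vz < vs := by omega
        rw [if_neg hnn1, if_neg hnn2, if_neg hnn1, if_neg hnn2, sweepB_cons]
        have hbmax : b < max cs cz := by
          have := hb (vs, cs) List.mem_cons_self (vz, cz) List.mem_cons_self (by simpa using hv)
          simpa using this
        have hm : b < (if cs < cz then cz else cs) := by
          rw [max_def] at hbmax
          split_ifs at hbmax ⊢ <;> omega
        rw [if_pos (show b < ((vs, if cs < cz then cz else cs) : Int × Int).2 from hm)]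
        by_cases hcc : cz < cs
        · -- cz < cs : A emits (vs, cs)
          rw [if_pos hcc]
          have hval : (if cs < cz then cz else cs) = cs := by rw [if_neg (by omega)]
          rw [hval]
          congr 1
          apply ih _ _ _ (by omega) hstl hztl
          intro q hq r hr _
          exact lt_of_lt_of_le (hshd q hq).2 (le_max_left _ _)
        · -- cs ≤ cz : A emits (vz, cz)
          rw [if_neg hcc]
          have hval : (if cs < cz then cz else cs) = cz := by split_ifs <;> omega
          rw [hval, hv]
          congr 1
          apply ih _ _ _ (by omega) hstl hztl
          intro q hq r hr _
          exact lt_of_lt_of_le (hzhd r hr).2 (le_max_right _ _)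
      · have hnn1 : ¬ vs < vz := by omega
        rw [if_neg hnn1, if_pos hv, if_neg hnn1, if_pos hv, sweepB_cons]
        split_ifs with hc
        · congr 1
          apply ih _ _ _ (by simp; omega) hs hztl
          intro q hq r hr _
          exact lt_of_lt_of_le (hzhd r hr).2 (le_max_right _ _)
        · apply ih _ _ _ (by simp; omega) hs hztl
          intro q hq r hr he
          exact hb q hq r (List.mem_cons_of_mem _ hr) he

theorem insertBy_split (x : Int × Int) : ∀ (u w : List (Int × Int)),
    (∀ q ∈ u, ¬ x.1 < q.1) → (∀ q ∈ w, x.1 < q.1) →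
    PySem.List.insertBy (fun a b => decide (a.1 < b.1)) x (u ++ w) = u ++ x :: w := by
  intro u
  induction u with
  | nil =>
    intro w _ hw
    cases w with
    | nil => rfl
    | cons y ys =>
      show (if decide (x.1 < y.1) then _ else _) = _
      rw [if_pos (by simpa using hw y List.mem_cons_self)]
      rfl
  | cons q u ih =>
    intro w hu hw
    show (if decide (x.1 < q.1) then _ else _) = _
    rw [if_neg (by simpa using hu q List.mem_cons_self)]
    simp only [List.cons_append, List.cons.injEq, true_and]
    exact ih w (fun r hr => hu r (List.mem_cons_of_mem _ hr)) hw

theorem dropWhile_fst_bound (t : Int) : ∀ (s : List (Int × Int)),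
    s.Pairwise (fun a b => a.1 ≤ b.1) →
    ∀ q ∈ s.dropWhile (fun p => decide (p.1 ≤ t)), t < q.1 := by
  intro s
  induction s with
  | nil => intro _ q hq; simp at hq
  | cons a s ih =>
    intro hp q hq
    obtain ⟨hhd, htl⟩ := List.pairwise_cons.1 hp
    by_cases h : a.1 ≤ t
    · rw [List.dropWhile_cons_of_pos (by simpa using h)] at hq
      exact ih htl q hq
    · rw [List.dropWhile_cons_of_neg (by simpa using h)] at hq
      rcases List.mem_cons.1 hq with rfl | hq
      · omega
      · have := hhd q hq
        omega

theorem mergeKeep_nil_right : ∀ (s : List (Int × Int)), mergeKeep s [] = s := by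
  intro s; cases s <;> simp [mergeKeep]

theorem mergeKeep_z_head (b : Int × Int) (z s : List (Int × Int))
    (hs : ∀ q ∈ s, b.1 < q.1) : mergeKeep s (b :: z) = b :: mergeKeep s z := by
  cases s with
  | nil => rw [mergeKeep, mergeKeep]
  | cons a s =>
    rw [mergeKeep, if_neg (by have := hs a List.mem_cons_self; omega)]

theorem mergeKeep_insert (zh : Int × Int) : ∀ (u w zt : List (Int × Int)),
    (∀ q ∈ u, q.1 ≤ zh.1) → (∀ q ∈ w, zh.1 < q.1) → (∀ r ∈ zt, zh.1 < r.1) →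
    mergeKeep (u ++ zh :: w) zt = mergeKeep (u ++ w) (zh :: zt) := by
  intro u
  induction u with
  | nil =>
    intro w zt hu hw hzt
    simp only [List.nil_append]
    rw [mergeKeep_z_head zh zt w hw]
    cases zt with
    | nil => rw [mergeKeep_nil_right, mergeKeep_nil_right]
    | cons th zt' =>
      cases w with
      | nil =>
        simp [mergeKeep, le_of_lt (hzt th List.mem_cons_self)]
      | cons q w' =>
        rw [mergeKeep, if_pos (le_of_lt (hzt th List.mem_cons_self))]
  | cons q u ih =>
    intro w zt hu hw hzt
    have hq : q.1 ≤ zh.1 := hu q List.mem_cons_self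
    have key := ih w zt (fun r hr => hu r (List.mem_cons_of_mem _ hr)) hw hzt
    simp only [List.cons_append]
    cases zt with
    | nil =>
      rw [mergeKeep_nil_right, mergeKeep, if_pos hq, ← key, mergeKeep_nil_right]
    | cons th zt' =>
      rw [mergeKeep, if_pos (le_of_lt (lt_of_le_of_lt hq (hzt th List.mem_cons_self))),
        mergeKeep, if_pos hq, key]

theorem foldl_insert_eq_mergeKeep : ∀ (z s : List (Int × Int)),
    s.Pairwise (fun a b => a.1 ≤ b.1) → IncV z →
    List.foldl (fun acc x => PySem.List.insertBy (fun a b => decide (a.1 < b.1)) x acc) s z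
      = mergeKeep s z := by
  intro z
  induction z with
  | nil => intro s _ _; rw [List.foldl_nil, mergeKeep_nil_right]
  | cons zh zt ih =>
    intro s hs hz
    obtain ⟨hzhd, hztl⟩ := List.pairwise_cons.1 hz
    rw [List.foldl_cons]
    have hsplit : s.takeWhile (fun p => decide (p.1 ≤ zh.1)) ++ s.dropWhile (fun p => decide (p.1 ≤ zh.1)) = s := List.takeWhile_append_dropWhile
    set u := s.takeWhile (fun p => decide (p.1 ≤ zh.1)) with hu_def
    set w := s.dropWhile (fun p => decide (p.1 ≤ zh.1)) with hw_def
    have hu : ∀ q ∈ u, q.1 ≤ zh.1 := by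
      intro q hq
      have := List.mem_takeWhile_imp hq
      simpa using this
    have hw : ∀ q ∈ w, zh.1 < q.1 := dropWhile_fst_bound zh.1 s hs
    have hins : PySem.List.insertBy (fun a b => decide (a.1 < b.1)) zh s = u ++ zh :: w := by
      conv_lhs => rw [← hsplit]
      exact insertBy_split zh u w (fun q hq => by have := hu q hq; omega) hw
    rw [hins]
    have hu_pw : u.Pairwise (fun a b => a.1 ≤ b.1) := hs.sublist (List.takeWhile_sublist _)
    have hw_pw : w.Pairwise (fun a b => a.1 ≤ b.1) := hs.sublist (List.dropWhile_sublist _)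
    have hsorted : (u ++ zh :: w).Pairwise (fun a b => a.1 ≤ b.1) := by
      apply List.pairwise_append.2
      refine ⟨hu_pw, List.pairwise_cons.2 ⟨fun q hq => le_of_lt (hw q hq), hw_pw⟩, ?_⟩
      intro a ha b hb
      rcases List.mem_cons.1 hb with rfl | hb
      · exact hu a ha
      · exact le_of_lt (lt_of_le_of_lt (hu a ha) (hw b hb))
    rw [ih _ hsorted hztl, mergeKeep_insert zh u w zt hu hw (fun r hr => hzhd r hr), hsplit]

theorem sorted_append_eq_mergeKeep (s z : List (Int × Int))
    (hs : s.Pairwise (fun a b => a.1 ≤ b.1)) (hz : IncV z) :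
    PySem.List.sorted (s ++ z) (fun p => p.1) false = mergeKeep s z := by
  have hrw := PySem.List.sorted_eq_foldl_insertBy (s ++ z) (fun p : Int × Int => p.1)
  simp only at hrw
  rw [hrw, List.foldl_append]
  have h1 : List.foldl (fun acc x => PySem.List.insertBy (fun a b => decide (a.1 < b.1)) x acc) [] s = s := by
    have h2 := PySem.List.sorted_eq_foldl_insertBy s (fun p : Int × Int => p.1)
    simp only at h2
    rw [← h2]
    exact PySem.List.sorted_eq_self_of_pairwise s (fun p => p.1) hs
  rw [h1]
  exact foldl_insert_eq_mergeKeep z s hs hz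

theorem mem_mergeKeep : ∀ (n : ℕ) (s z : List (Int × Int)) (q : Int × Int),
    s.length + z.length ≤ n → q ∈ mergeKeep s z → q ∈ s ∨ q ∈ z := by
  intro n
  induction n with
  | zero =>
    intro s z q hlen h
    cases s with
    | nil => rw [mergeKeep] at h; exact Or.inr h
    | cons _ _ => simp at hlen
  | succ n ih =>
    intro s z q hlen h
    cases s with
    | nil => rw [mergeKeep] at h; exact Or.inr h
    | cons a s =>
      cases z with
      | nil => rw [mergeKeep_nil_right] at h; exact Or.inl h
      | cons b z =>
        simp only [List.length_cons] at hlen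
        rw [mergeKeep] at h
        split_ifs at h with hc
        · rcases List.mem_cons.1 h with rfl | h
          · exact Or.inl List.mem_cons_self
          · rcases ih s (b :: z) q (by simp; omega) h with h | h
            · exact Or.inl (List.mem_cons_of_mem _ h)
            · exact Or.inr h
        · rcases List.mem_cons.1 h with rfl | h
          · exact Or.inr List.mem_cons_self
          · rcases ih (a :: s) z q (by simp; omega) h with h | h
            · exact Or.inl h
            · exact Or.inr (List.mem_cons_of_mem _ h)

theorem pometi_nil (c : Int × Int) (b : Int) :
    pometi c [] b = if b < c.2 then [c] else [] := by
  obtain ⟨vol, val⟩ := c; rfl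

theorem pometi_cons (c m : Int × Int) (rest : List (Int × Int)) (b : Int) :
    pometi c (m :: rest) b =
      if m.1 = c.1 then pometi (c.1, if c.2 < m.2 then m.2 else c.2) rest b
      else if b < c.2 then c :: pometi m rest c.2 else pometi m rest b := by
  obtain ⟨vol, val⟩ := c; obtain ⟨v2, c2⟩ := m; rfl

theorem pometi_step (c : Int × Int) (M : List (Int × Int)) (b : Int)
    (h : ∀ m ∈ M.head?, m.1 ≠ c.1) :
    pometi c M b = if b < c.2 then c :: pometiTop M c.2 else pometiTop M b := by
  cases M with
  | nil => rw [pometi_nil]; split_ifs <;> rfl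
  | cons m rest =>
    rw [pometi_cons, if_neg (h m (by simp))]
    rfl

theorem pometiTop_eq_sweepB_nodup : ∀ (l : List (Int × Int)) (b : Int), IncV l →
    pometiTop l b = sweepB l b := by
  intro l
  induction l with
  | nil => intro b _; rfl
  | cons c rest ih =>
    intro b hl
    obtain ⟨hhd, htl⟩ := List.pairwise_cons.1 hl
    show pometi c rest b = _
    rw [pometi_step c rest b
      (fun m hm => by have := hhd m (List.mem_of_mem_head? hm); omega), sweepB_cons]
    split_ifs
    · rw [ih _ htl]
    · rw [ih _ htl]

theorem mergeMaxT_nil_right : ∀ (s : List (Int × Int)), mergeMaxT s [] = s := by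
  intro s; cases s <;> simp [mergeMaxT]

theorem pometiTop_mergeKeep : ∀ (n : ℕ) (s z : List (Int × Int)) (b : Int),
    s.length + z.length ≤ n → IncV s → IncV z →
    pometiTop (mergeKeep s z) b = sweepB (mergeMaxT s z) b := by
  intro n
  induction n with
  | zero =>
    intro s z b hlen hs hz
    cases s with
    | nil =>
      rw [mergeKeep, mergeMaxT]
      exact pometiTop_eq_sweepB_nodup z b hz
    | cons _ _ => simp at hlen
  | succ n ih =>
    intro s z b hlen hs hz
    match s, z with
    | [], z =>
      rw [mergeKeep, mergeMaxT]
      exact pometiTop_eq_sweepB_nodup z b hz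
    | a :: s, [] =>
      rw [mergeKeep_nil_right, mergeMaxT_nil_right]
      exact pometiTop_eq_sweepB_nodup _ b hs
    | (vs, cs) :: s, (vz, cz) :: z =>
      obtain ⟨hshd, hstl⟩ := List.pairwise_cons.1 hs
      obtain ⟨hzhd, hztl⟩ := List.pairwise_cons.1 hz
      simp only [List.length_cons] at hlen
      rcases lt_trichotomy vs vz with hv | hv | hv
      · -- s head first
        rw [mergeKeep, if_pos (by simpa using le_of_lt hv), mergeMaxT, if_pos hv]
        have hhead : ∀ m ∈ (mergeKeep s ((vz, cz) :: z)).head?, m.1 ≠ ((vs, cs) : Int × Int).1 := by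
          intro m hm
          have hmem := mem_mergeKeep (s.length + (z.length + 1)) s ((vz, cz) :: z) m
            (by simp) (List.mem_of_mem_head? hm)
          rcases hmem with h | h
          · have := hshd m h; simp; omega
          · rcases List.mem_cons.1 h with rfl | h
            · simp; omega
            · have := hzhd m h; simp at this ⊢; omega
        show pometi (vs, cs) (mergeKeep s ((vz, cz) :: z)) b = _
        rw [pometi_step _ _ _ hhead, sweepB_cons]
        split_ifs <;> rw [ih s ((vz, cz) :: z) _ (by simp; omega) hstl hz]
      · -- equal volumes: the two points are adjacent in the merged list
        have hz_head : mergeKeep s ((vz, cz) :: z) = (vz, cz) :: mergeKeep s z := by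
          apply mergeKeep_z_head
          intro q hq
          have := hshd q hq; simp at this ⊢; omega
        rw [mergeKeep, if_pos (by simpa using le_of_eq hv), hz_head, mergeMaxT,
          if_neg (by omega), if_neg (by omega)]
        show pometi (vs, cs) ((vz, cz) :: mergeKeep s z) b = _
        rw [pometi_cons, if_pos (by simpa using hv.symm)]
        have hhead : ∀ m ∈ (mergeKeep s z).head?, m.1 ≠ (((vs, cs) : Int × Int).1, if ((vs, cs) : Int × Int).2 < ((vz, cz) : Int × Int).2 then ((vz, cz) : Int × Int).2 else ((vs, cs) : Int × Int).2).1 := by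
          intro m hm
          have hmem := mem_mergeKeep (s.length + z.length) s z m (by simp) (List.mem_of_mem_head? hm)
          rcases hmem with h | h
          · have := hshd m h; simp at this ⊢; omega
          · have := hzhd m h; simp at this ⊢; omega
        rw [pometi_step _ _ _ hhead, sweepB_cons]
        split_ifs <;> rw [ih s z _ (by omega) hstl hztl]
      · -- z head first
        rw [mergeKeep, if_neg (by simpa using not_le.2 hv), mergeMaxT,
          if_neg (by omega), if_pos hv]
        have hhead : ∀ m ∈ (mergeKeep ((vs, cs) :: s) z).head?, m.1 ≠ ((vz, cz) : Int × Int).1 := by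
          intro m hm
          have hmem := mem_mergeKeep ((s.length + 1) + z.length) ((vs, cs) :: s) z m
            (by simp) (List.mem_of_mem_head? hm)
          rcases hmem with h | h
          · rcases List.mem_cons.1 h with rfl | h
            · simp; omega
            · have := hshd m h; simp at this ⊢; omega
          · have := hzhd m h; simp at this ⊢; omega
        show pometi (vz, cz) (mergeKeep ((vs, cs) :: s) z) b = _
        rw [pometi_step _ _ _ hhead, sweepB_cons]
        split_ifs <;> rw [ih ((vs, cs) :: s) z _ (by simp; omega) hs hztl]

-- when every s volume is bounded by z's last volume, A's tail-dropping merge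
-- and the total merge coincide (z is never exhausted strictly first)
theorem mergeMaxT_eq_mergeMax : ∀ (n : ℕ) (s z : List (Int × Int)) (h : z ≠ []),
    s.length + z.length ≤ n → IncV s → IncV z →
    (∀ q ∈ s, q.1 ≤ (z.getLast h).1) →
    mergeMaxT s z = mergeMax s z := by
  intro n
  induction n with
  | zero =>
    intro s z h hlen _ _ _
    cases z with
    | nil => exact absurd rfl h
    | cons _ _ => simp at hlen
  | succ n ih =>
    intro s z h hlen hs hz hb
    match s, z with
    | [], z => rw [mergeMaxT, mergeMax]
    | (vs, cs) :: s, (vz, cz) :: z =>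
      obtain ⟨hshd, hstl⟩ := List.pairwise_cons.1 hs
      obtain ⟨hzhd, hztl⟩ := List.pairwise_cons.1 hz
      simp only [List.length_cons] at hlen
      rcases lt_trichotomy vs vz with hv | hv | hv
      · rw [mergeMaxT, if_pos hv, mergeMax, if_pos hv]
        congr 1
        apply ih s ((vz, cz) :: z) h (by simp; omega) hstl hz
        intro q hq
        exact hb q (List.mem_cons_of_mem _ hq)
      · have hnn1 : ¬ vs < vz := by omega
        have hnn2 : ¬ vz < vs := by omega
        rw [mergeMaxT, if_neg hnn1, if_neg hnn2, mergeMax, if_neg hnn1, if_neg hnn2]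
        congr 1
        cases z with
        | nil =>
          have hsnil : s = [] := by
            cases s with
            | nil => rfl
            | cons q s' =>
              have h1 := hshd q List.mem_cons_self
              have h2 := hb q (List.mem_cons_of_mem _ List.mem_cons_self)
              simp at h2
              omega
          rw [hsnil, mergeMaxT, mergeMax]
        | cons c z' =>
          have hgl : ((((vz, cz) :: c :: z')).getLast h).1 = ((c :: z').getLast (by simp)).1 := by
            rw [List.getLast_cons (by simp)]
          apply ih s (c :: z') (by simp) (by simp at hlen ⊢; omega) hstl hztl
          intro q hq
          have := hb q (List.mem_cons_of_mem _ hq)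
          rw [hgl] at this
          exact this
      · cases z with
        | nil =>
          exfalso
          have := hb (vs, cs) List.mem_cons_self
          simp at this
          omega
        | cons c z' =>
          have hnn1 : ¬ vs < vz := by omega
          rw [mergeMaxT, if_neg hnn1, if_pos hv, mergeMax, if_neg hnn1, if_pos hv]
          congr 1
          have hgl : ((((vz, cz) :: c :: z')).getLast h).1 = ((c :: z').getLast (by simp)).1 := by
            rw [List.getLast_cons (by simp)]
          apply ih ((vs, cs) :: s) (c :: z') (by simp) (by simp at hlen ⊢; omega) hs hztl
          intro q hq
          have := hb q hq
          rw [hgl] at this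
          exact this

theorem mem_mergeMax : ∀ (n : ℕ) (s z : List (Int × Int)) (q : Int × Int),
    s.length + z.length ≤ n → q ∈ mergeMax s z → (∃ r, (r ∈ s ∨ r ∈ z) ∧ q.1 = r.1) := by
  intro n
  induction n with
  | zero =>
    intro s z q hlen hmem
    match s, z with
    | [], [] => rw [mergeMax] at hmem; simp at hmem
    | a :: s, z => simp at hlen
    | [], a :: z => simp at hlen
  | succ n ih =>
    intro s z q hlen hmem
    match s, z with
    | [], z => rw [mergeMax] at hmem; exact ⟨q, Or.inr hmem, rfl⟩
    | a :: s, [] => rw [mergeMax] at hmem; simp at hmem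
    | (vs, cs) :: s, (vz, cz) :: z =>
      simp only [List.length_cons] at hlen
      rw [mergeMax] at hmem
      split_ifs at hmem with h1 h2
      · rcases List.mem_cons.1 hmem with rfl | hmem
        · exact ⟨_, Or.inl List.mem_cons_self, rfl⟩
        · rcases ih s ((vz, cz) :: z) q (by simp; omega) hmem with ⟨r, hr, he⟩
          rcases hr with hr | hr
          · exact ⟨r, Or.inl (List.mem_cons_of_mem _ hr), he⟩
          · exact ⟨r, Or.inr hr, he⟩
      · rcases List.mem_cons.1 hmem with rfl | hmem
        · exact ⟨_, Or.inr List.mem_cons_self, rfl⟩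
        · rcases ih ((vs, cs) :: s) z q (by simp; omega) hmem with ⟨r, hr, he⟩
          rcases hr with hr | hr
          · exact ⟨r, Or.inl hr, he⟩
          · exact ⟨r, Or.inr (List.mem_cons_of_mem _ hr), he⟩
      all_goals {
        rcases List.mem_cons.1 hmem with rfl | hmem
        · exact ⟨(vs, cs), Or.inl List.mem_cons_self, rfl⟩
        · rcases ih s z q (by omega) hmem with ⟨r, hr, he⟩
          rcases hr with hr | hr
          · exact ⟨r, Or.inl (List.mem_cons_of_mem _ hr), he⟩
          · exact ⟨r, Or.inr (List.mem_cons_of_mem _ hr), he⟩ }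

theorem mergeMax_incV : ∀ (n : ℕ) (s z : List (Int × Int)),
    s.length + z.length ≤ n → IncV s → IncV z → IncV (mergeMax s z) := by
  intro n
  induction n with
  | zero =>
    intro s z hlen hs hz
    match s, z with
    | [], [] => rw [mergeMax]; exact List.Pairwise.nil
    | a :: s, z => simp at hlen
    | [], a :: z => simp at hlen
  | succ n ih =>
    intro s z hlen hs hz
    match s, z with
    | [], z => rw [mergeMax]; exact hz
    | a :: s, [] => rw [mergeMax]; exact List.Pairwise.nil
    | (vs, cs) :: s, (vz, cz) :: z =>
      obtain ⟨hshd, hstl⟩ := List.pairwise_cons.1 hs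
      obtain ⟨hzhd, hztl⟩ := List.pairwise_cons.1 hz
      simp only [List.length_cons] at hlen
      rw [mergeMax]
      split_ifs with h1 h2
      · refine List.pairwise_cons.2 ⟨?_, ih s ((vz, cz) :: z) (by simp; omega) hstl hz⟩
        intro q hq
        rcases mem_mergeMax (s.length + (z.length + 1)) s ((vz, cz) :: z) q (by simp) hq with ⟨r, hr, he⟩
        rcases hr with hr | hr
        · have := hshd r hr; simp at this ⊢; omega
        · rcases List.mem_cons.1 hr with rfl | hr
          · simp at he ⊢; omega
          · have := hzhd r hr; simp at this he ⊢; omega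
      · refine List.pairwise_cons.2 ⟨?_, ih ((vs, cs) :: s) z (by simp; omega) hs hztl⟩
        intro q hq
        rcases mem_mergeMax ((s.length + 1) + z.length) ((vs, cs) :: s) z q (by simp) hq with ⟨r, hr, he⟩
        rcases hr with hr | hr
        · rcases List.mem_cons.1 hr with rfl | hr
          · simp at he ⊢; omega
          · have := hshd r hr; simp at this he ⊢; omega
        · have := hzhd r hr; simp at this he ⊢; omega
      all_goals {
        refine List.pairwise_cons.2 ⟨?_, ih s z (by omega) hstl hztl⟩
        intro q hq
        rcases mem_mergeMax (s.length + z.length) s z q le_rfl hq with ⟨r, hr, he⟩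
        rcases hr with hr | hr
        · have := hshd r hr; simp at this he ⊢; omega
        · have := hzhd r hr; simp at this he ⊢; omega }

theorem inc2_sestaviZ (S : List (Int × Int)) (p : Int × Int) (h : Inc2 S) :
    Inc2 (sestaviZ S p) := by
  unfold sestaviZ Inc2
  refine List.Pairwise.map _ ?_ h
  intro a b hab
  exact ⟨by simp; omega, by simp; omega⟩

theorem A_as_sweep (S : List (Int × Int)) (p : Int × Int) (h : InvS S) :
    sestaviS S (sestaviZ S p) = sweepB (mergeMax S (sestaviZ S p)) (-1) := by
  obtain ⟨h2, h0⟩ := h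
  unfold sestaviS
  apply loop_eq_sweep (S.length + (sestaviZ S p).length) _ _ _ le_rfl h2 (inc2_sestaviZ S p h2)
  intro q hq r hr _
  exact lt_of_lt_of_le (by have := h0 q hq; omega) (le_max_left _ _)

theorem incV_le_getLast : ∀ (l : List (Int × Int)) (h : l ≠ []), IncV l →
    ∀ r ∈ l, r.1 ≤ (l.getLast h).1 := by
  intro l
  induction l with
  | nil => intro h; exact absurd rfl h
  | cons a l ih =>
    intro h hl r hr
    obtain ⟨hhd, htl⟩ := List.pairwise_cons.1 hl
    cases l with
    | nil =>
      simp at hr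
      simp [hr]
    | cons b l' =>
      rw [List.getLast_cons (by simp)]
      rcases List.mem_cons.1 hr with rfl | hr
      · exact le_of_lt (lt_of_lt_of_le (hhd _ (List.getLast_mem (by simp)))
          (le_refl _))
      · exact ih (by simp) htl r hr

theorem step_eq (S : List (Int × Int)) (p : Int × Int) (hw : 0 ≤ p.1) (h : InvS S) :
    sestaviS S (sestaviZ S p) = korak S p := by
  cases S with
  | nil =>
    show sestaviSLoop [] [] (-1) = []
    rw [sestaviSLoop]
    rfl
  | cons q qs =>
    obtain ⟨h2, h0⟩ := h
    have hIncS : IncV (q :: qs) := h2.imp (fun hh => hh.1)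
    have hz2 : Inc2 ((q :: qs).map (fun r => (r.1 + p.1, r.2 + p.2))) := inc2_sestaviZ _ p h2
    have hIncz : IncV ((q :: qs).map (fun r => (r.1 + p.1, r.2 + p.2))) := hz2.imp (fun hh => hh.1)
    have hzne : (q :: qs).map (fun r : Int × Int => (r.1 + p.1, r.2 + p.2)) ≠ [] := by simp
    rw [A_as_sweep _ p ⟨h2, h0⟩]
    show _ = pometiTop (PySem.List.sorted
      ((q :: qs) ++ (q :: qs).map (fun r => (r.1 + p.1, r.2 + p.2))) (fun r => r.1) false) (-1)
    rw [sorted_append_eq_mergeKeep _ _ (hIncS.imp le_of_lt) hIncz]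
    rw [pometiTop_mergeKeep ((q :: qs).length
        + ((q :: qs).map (fun r : Int × Int => (r.1 + p.1, r.2 + p.2))).length) _ _ _ le_rfl hIncS hIncz]
    have hgl : (((q :: qs).map (fun r : Int × Int => (r.1 + p.1, r.2 + p.2))).getLast hzne).1
        = ((q :: qs).getLast (by simp)).1 + p.1 := by
      rw [List.getLast_map]
    have hbound : ∀ r ∈ (q :: qs), r.1 ≤ (((q :: qs).map (fun r : Int × Int => (r.1 + p.1, r.2 + p.2))).getLast hzne).1 := by
      intro r hr
      rw [hgl]
      have := incV_le_getLast (q :: qs) (by simp) hIncS r hr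
      omega
    rw [mergeMaxT_eq_mergeMax ((q :: qs).length + ((q :: qs).map (fun r : Int × Int => (r.1 + p.1, r.2 + p.2))).length)
      (q :: qs) _ hzne le_rfl hIncS hIncz hbound]
    rfl

theorem step_inv (S : List (Int × Int)) (p : Int × Int) (h : InvS S) :
    InvS (sestaviS S (sestaviZ S p)) := by
  obtain ⟨h2, h0⟩ := h
  rw [A_as_sweep S p ⟨h2, h0⟩]
  have hMv : IncV (mergeMax S (sestaviZ S p)) :=
    mergeMax_incV (S.length + (sestaviZ S p).length) _ _ le_rfl (h2.imp fun hh => hh.1)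
      ((inc2_sestaviZ S p h2).imp fun hh => hh.1)
  constructor
  · exact (hMv.sublist (sweepB_sublist (mergeMax S (sestaviZ S p)) (-1))).and
      (sweepB_mem_val (mergeMax S (sestaviZ S p)) (-1)).2
  · intro q hq
    have := (sweepB_mem_val (mergeMax S (sestaviZ S p)) (-1)).1 q hq
    omega

theorem fold_eq : ∀ (l : List (Int × Int)) (S : List (Int × Int)) (acc : List (List (Int × Int))),
    (∀ p ∈ l, 0 ≤ p.1) → InvS S →
    (List.foldl (fun st predmet =>
        let Z := sestaviZ st.1 predmet
        let S := sestaviS st.1 Z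
        (S, st.2 ++ [S])) (S, acc) l).2
      = (List.foldl (fun st predmet =>
        let S := korak st.1 predmet
        (S, st.2 ++ [S])) (S, acc) l).2 := by
  intro l
  induction l with
  | nil => intro S acc _ _; rfl
  | cons p l ihl =>
    intro S acc hnn hS
    have he := step_eq S p (hnn p List.mem_cons_self) hS
    have hi := step_inv S p hS
    rw [List.foldl_cons, List.foldl_cons]
    show (List.foldl _ (sestaviS S (sestaviZ S p), acc ++ [sestaviS S (sestaviZ S p)]) l).2
      = (List.foldl _ (korak S p, acc ++ [korak S p]) l).2
    rw [he]
    exact ihl _ _ (fun r hr => hnn r (List.mem_cons_of_mem _ hr)) (he ▸ hi)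

-- ===== VERDICT (by name: the statement is the Claim_ definition above) =====
theorem mnoziceS_spec : Claim_equal_mnoziceS := by
  intro predmeti _ hpre
  unfold Spec_mnoziceS mnoziceS mnoziceS_alt
  exact fold_eq predmeti [(0, 0)] [[(0, 0)]] hpre
    ⟨List.pairwise_singleton _ _, by intro q hq; simp at hq; simp [hq]⟩
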